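-- pv_equiv track=rewrite | github.com/selfcustody/krux | src/krux/pages/home_pages/miniscript_indenter.py | _join_closing_parens
-- ===== SOURCE A (Python) =====
-- def _join_closing_parens(lines):
--     """
--     Post-processing step:
--     If a line is only one or more closing parentheses (possibly with indentation),
--     append them to the end of the previous line, so no line is just ')'.
--
--     """
--     i = len(lines) - 1
--     while i > 0:
--         stripped = lines[i].strip()
--         # Check if stripped is only some number of ')'
--         if stripped and all(ch == ")" for ch in stripped):
--             # Append them (minus indentation) to previous line
--             lines[i - 1] = "{0}{1}".format(lines[i - 1], stripped)
--             lines.pop(i)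
--         i -= 1
--     return lines
-- ===== SOURCE B (Python) =====
-- def _join_closing_parens(lines):
--     # Single reverse pass: carry the stripped closing-paren suffix leftward and
--     # rebuild the list once instead of A's repeated mid-list pops.
--     # Return-value equivalence only: A mutates `lines` in place, B builds a new list.
--     out = []
--     pending = ""
--     for line in reversed(lines[1:]):
--         s = line + pending
--         st = s.strip()
--         if st and all(ch == ")" for ch in st):
--             pending = st
--         else:
--             out.append(s)
--             pending = ""
--     if not lines:
--         return []
--     return [lines[0] + pending] + out[::-1]
-- ===== Notes on version B (the rewrite author's own statement) =====
-- stated objective: alternative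
-- what changed: A scans backward repeatedly mutating the list in place (mid-list pops and re-reads); B does one reverse pass carrying the pending stripped closing-paren suffix and rebuilds the list once, without mutation.
import Mathlib
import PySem

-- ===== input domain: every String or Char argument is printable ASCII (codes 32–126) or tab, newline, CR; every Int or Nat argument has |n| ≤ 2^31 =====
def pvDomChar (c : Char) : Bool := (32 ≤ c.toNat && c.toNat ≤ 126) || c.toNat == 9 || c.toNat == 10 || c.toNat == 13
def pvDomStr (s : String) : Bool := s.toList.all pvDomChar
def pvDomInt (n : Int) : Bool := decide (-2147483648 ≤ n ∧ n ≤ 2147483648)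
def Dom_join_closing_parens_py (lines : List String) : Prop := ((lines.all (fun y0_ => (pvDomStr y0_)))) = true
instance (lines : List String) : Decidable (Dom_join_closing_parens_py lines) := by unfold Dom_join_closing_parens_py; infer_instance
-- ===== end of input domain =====

-- B replaces A's backward in-place scan with pops by a single reverse pass carrying the
-- pending closing-paren suffix; return-value equivalence only: A mutates `lines`
-- in place, B builds a fresh list.

-- shared literal predicate: Python's `stripped and all(ch == ")" for ch in stripped)`
def pvIsClosing (st : String) : Bool := !st.isEmpty && st.toList.all (fun ch => ch == ')')

-- ===== PORT A =====
-- the `while i > 0` loop: counter i, state `lines`; each step reads lines[i].strip(),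
-- possibly does lines[i-1] = lines[i-1] + stripped and lines.pop(i), then i -= 1
def joinA_loop (lines : List String) (i : Nat) : List String :=
  match i with
  | 0 => lines
  | j + 1 =>
    let stripped := PySem.Str.strip ((PySem.List.pyGet? lines (Int.ofNat (j + 1))).getD "")
    let lines' :=
      if pvIsClosing stripped then
        -- lines[i-1] = "{0}{1}".format(lines[i-1], stripped)
        let l2 := lines.set j (((PySem.List.pyGet? lines (Int.ofNat j)).getD "") ++ stripped)
        -- lines.pop(i)
        match PySem.List.pop? l2 (Int.ofNat (j + 1)) with
        | some r => r.2
        | none => l2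
      else lines
    joinA_loop lines' j

def join_closing_parens_py (lines : List String) : List String :=
  joinA_loop lines (lines.length - 1)

-- ===== PORT B =====
def join_closing_parens_py_alt (lines : List String) : List String :=
  match lines with
  | [] => []
  | hd :: _ =>
    -- for line in reversed(lines[1:]): … with state (out, pending)
    let r := ((PySem.List.slice lines (some 1) none).reverse).foldl
      (fun (acc : List String × String) line =>
        let s := line ++ acc.2
        let st := PySem.Str.strip s
        if pvIsClosing st then (acc.1, st) else (acc.1 ++ [s], ""))
      ([], "")
    -- [lines[0] + pending] + list(reversed(out))
    (hd ++ r.2) :: r.1.reverse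

-- ===== PRECONDITION & SPEC =====
def Spec_join_closing_parens_py (lines : List String) (out : List String) : Prop := out = join_closing_parens_py_alt lines
instance (lines : List String) (out : List String) : Decidable (Spec_join_closing_parens_py lines out) := by unfold Spec_join_closing_parens_py; infer_instance

-- ===== CLAIM (what is proved, stated in full; the proofs are below) =====
def Claim_equal_join_closing_parens_py : Prop := ∀ (lines : List String), Dom_join_closing_parens_py lines → Spec_join_closing_parens_py lines (join_closing_parens_py lines)

-- ===== LEMMAS AND PROOFS =====

-- goJ xs = (pending, out): the right-to-left merge of a tail `xs`, structurally
def goJ : List String → String × List String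
  | [] => ("", [])
  | x :: xs =>
    let r := goJ xs
    let s := x ++ r.1
    let st := PySem.Str.strip s
    if pvIsClosing st then (st, r.2) else ("", s :: r.2)

-- B's foldr (= foldl over the reversed tail) computes goJ with out reversed
theorem foldr_eq_goJ (xs : List String) :
    xs.foldr (fun line (acc : List String × String) =>
        let s := line ++ acc.2
        let st := PySem.Str.strip s
        if pvIsClosing st then (acc.1, st) else (acc.1 ++ [s], "")) ([], "")
      = ((goJ xs).2.reverse, (goJ xs).1) := by
  induction xs with
  | nil => simp [goJ]
  | cons x xs ih =>
    simp only [List.foldr_cons, ih, goJ]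
    split <;> simp

theorem alt_eq_goJ (hd : String) (tl : List String) :
    join_closing_parens_py_alt (hd :: tl) = (hd ++ (goJ tl).1) :: (goJ tl).2 := by
  show (let r := ((PySem.List.slice (hd :: tl) (some 1) none).reverse).foldl _ ([], "")
        (hd ++ r.2) :: r.1.reverse) = _
  have hs : PySem.List.slice (hd :: tl) (some 1) none = tl := by
    simpa using PySem.List.slice_from (hd :: tl) (a := 1) (by norm_num)
  rw [hs, List.foldl_reverse]
  simp only [foldr_eq_goJ, List.reverse_reverse]
theorem goJ_append_pair (xs : List String) (c y : String) :
    goJ (xs ++ [c, y]) =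
      (if pvIsClosing (PySem.Str.strip y) then goJ (xs ++ [c ++ PySem.Str.strip y])
       else ((goJ (xs ++ [c])).1, (goJ (xs ++ [c])).2 ++ [y])) := by
  induction xs with
  | nil =>
    by_cases hy : pvIsClosing (PySem.Str.strip y)
    · simp [goJ, String.append_empty, hy]
    · simp only [List.nil_append, goJ, String.append_empty, hy, if_false, Bool.false_eq_true]
      by_cases hc : pvIsClosing (PySem.Str.strip c) <;> simp [hc]
  | cons x xs ih =>
    by_cases hy : pvIsClosing (PySem.Str.strip y)
    · simp only [hy, if_true] at ih ⊢
      simp only [List.cons_append, goJ, ih]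
    · simp only [hy, if_false, Bool.false_eq_true] at ih ⊢
      simp only [List.cons_append, goJ, ih]
      by_cases hc : pvIsClosing (PySem.Str.strip (x ++ (goJ (xs ++ [c])).1)) <;> simp [hc]

theorem set_append_len {α : Type} (l : List α) (b v : α) (r : List α) :
    (l ++ b :: r).set l.length v = l ++ v :: r := by
  induction l with
  | nil => rfl
  | cons x xs ih => simp [ih]

theorem eraseIdx_append_len {α : Type} (l : List α) (x : α) (r : List α) :
    (l ++ x :: r).eraseIdx l.length = l ++ r := by
  induction l with
  | nil => rfl
  | cons y ys ih => simp [ih]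

set_option maxHeartbeats 1000000 in
theorem joinA_loop_eq (hd : String) (mid : List String) :
    ∀ (a p : String) (out : List String),
      joinA_loop ((hd :: mid) ++ (a ++ p) :: out) (mid.length + 1)
        = (hd ++ (goJ (mid ++ [a ++ p])).1) :: ((goJ (mid ++ [a ++ p])).2 ++ out) := by
  induction mid using List.reverseRecOn with
  | nil =>
    intro a p out
    show joinA_loop (hd :: (a ++ p) :: out) 1 = _
    rw [joinA_loop]
    have h1 : PySem.List.pyGet? (hd :: (a ++ p) :: out) (Int.ofNat 1) = some (a ++ p) := by
      simpa using PySem.List.pyGet?_append_length [hd] out (a ++ p)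
    have h0 : PySem.List.pyGet? (hd :: (a ++ p) :: out) (Int.ofNat 0) = some hd := by
      simpa using PySem.List.pyGet?_append_length ([] : List String) ((a ++ p) :: out) hd
    rw [h1, h0]
    simp only [Option.getD_some]
    by_cases hc : pvIsClosing (PySem.Str.strip (a ++ p))
    · simp only [hc, if_true]
      have hset : ((hd :: (a ++ p) :: out).set 0 (hd ++ PySem.Str.strip (a ++ p)))
          = (hd ++ PySem.Str.strip (a ++ p)) :: (a ++ p) :: out := rfl
      rw [hset]
      have hlt : 1 < ((hd ++ PySem.Str.strip (a ++ p)) :: (a ++ p) :: out).length := by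
        simp
      rw [show (Int.ofNat 1) = ((1 : Nat) : Int) from rfl,
          PySem.List.pop?_natCast _ 1 hlt]
      have he : ((hd ++ PySem.Str.strip (a ++ p)) :: (a ++ p) :: out).eraseIdx 1
          = (hd ++ PySem.Str.strip (a ++ p)) :: out := by
        simpa using eraseIdx_append_len [hd ++ PySem.Str.strip (a ++ p)] (a ++ p) out
      simp only [he, joinA_loop]
      simp [goJ, String.append_empty, hc]
    · simp only [hc, if_false, Bool.false_eq_true, joinA_loop]
      simp [goJ, String.append_empty, hc]
  | append_singleton mid' c ih =>
    intro a p out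
    have hlen : (mid' ++ [c]).length + 1 = (mid'.length + 1) + 1 := by simp
    rw [hlen, joinA_loop]
    have h1 : PySem.List.pyGet? ((hd :: (mid' ++ [c])) ++ (a ++ p) :: out)
        (Int.ofNat (mid'.length + 1 + 1)) = some (a ++ p) := by
      have h2 : (hd :: (mid' ++ [c])) ++ (a ++ p) :: out
          = (hd :: mid' ++ [c]) ++ (a ++ p) :: out := by simp
      rw [h2]
      simpa using PySem.List.pyGet?_append_length (hd :: mid' ++ [c]) out (a ++ p)
    have h0 : PySem.List.pyGet? ((hd :: (mid' ++ [c])) ++ (a ++ p) :: out)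
        (Int.ofNat (mid'.length + 1)) = some c := by
      have h2 : (hd :: (mid' ++ [c])) ++ (a ++ p) :: out
          = (hd :: mid') ++ c :: ((a ++ p) :: out) := by simp
      rw [h2]
      simpa using PySem.List.pyGet?_append_length (hd :: mid') ((a ++ p) :: out) c
    rw [h1, h0]
    simp only [Option.getD_some]
    rw [show (mid' ++ [c]) ++ [a ++ p] = mid' ++ [c, a ++ p] from by simp,
        goJ_append_pair]
    by_cases hc : pvIsClosing (PySem.Str.strip (a ++ p))
    · simp only [hc, if_true]
      have hset : (((hd :: (mid' ++ [c])) ++ (a ++ p) :: out).set (mid'.length + 1)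
            (c ++ PySem.Str.strip (a ++ p)))
          = (hd :: mid') ++ (c ++ PySem.Str.strip (a ++ p)) :: ((a ++ p) :: out) := by
        have h2 : (hd :: (mid' ++ [c])) ++ (a ++ p) :: out
            = (hd :: mid') ++ c :: ((a ++ p) :: out) := by simp
        rw [h2]
        have h3 : mid'.length + 1 = (hd :: mid').length := by simp
        rw [h3, set_append_len]
      rw [hset]
      have hlt : mid'.length + 1 + 1
          < ((hd :: mid') ++ (c ++ PySem.Str.strip (a ++ p)) :: ((a ++ p) :: out)).length := by
        simp
      rw [show (Int.ofNat (mid'.length + 1 + 1)) = ((mid'.length + 1 + 1 : Nat) : Int) from rfl,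
          PySem.List.pop?_natCast _ _ hlt]
      have he : ((hd :: mid') ++ (c ++ PySem.Str.strip (a ++ p)) :: ((a ++ p) :: out)).eraseIdx
            (mid'.length + 1 + 1)
          = (hd :: mid') ++ (c ++ PySem.Str.strip (a ++ p)) :: out := by
        have h3 : (hd :: mid') ++ (c ++ PySem.Str.strip (a ++ p)) :: ((a ++ p) :: out)
            = ((hd :: mid') ++ [c ++ PySem.Str.strip (a ++ p)]) ++ (a ++ p) :: out := by simp
        have h4 : mid'.length + 1 + 1 = ((hd :: mid') ++ [c ++ PySem.Str.strip (a ++ p)]).length := by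
          simp
        rw [h3, h4, eraseIdx_append_len]
        simp
      simp only [he]
      have := ih (c ++ PySem.Str.strip (a ++ p)) "" out
      simp only [String.append_empty] at this
      simpa using this
    · simp only [hc, if_false, Bool.false_eq_true]
      have h5 : (hd :: (mid' ++ [c])) ++ (a ++ p) :: out
          = (hd :: mid') ++ (c ++ "") :: ((a ++ p) :: out) := by
        simp [String.append_empty]
      rw [h5]
      have := ih c "" ((a ++ p) :: out)
      simp only [String.append_empty] at this ⊢
      rw [this]
      simp

-- ===== VERDICT (by name: the statement is the Claim_ definition above) =====
theorem join_closing_parens_py_spec : Claim_equal_join_closing_parens_py := by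
  intro lines _
  show join_closing_parens_py lines = join_closing_parens_py_alt lines
  match lines with
  | [] => rfl
  | [hd] =>
    show joinA_loop [hd] 0 = _
    rw [alt_eq_goJ]
    simp [joinA_loop, goJ, String.append_empty]
  | hd :: tl =>
    rcases List.eq_nil_or_concat tl with h | ⟨mid, a, rfl⟩
    · subst h
      rw [alt_eq_goJ]
      simp [join_closing_parens_py, joinA_loop, goJ, String.append_empty]
    · rw [List.concat_eq_append]
      show joinA_loop (hd :: (mid ++ [a])) ((hd :: (mid ++ [a])).length - 1) = _
      have hlen : (hd :: (mid ++ [a])).length - 1 = mid.length + 1 := by simp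
      have hform : hd :: (mid ++ [a]) = (hd :: mid) ++ (a ++ "") :: [] := by
        simp [String.append_empty]
      rw [hlen, hform, joinA_loop_eq hd mid a "" []]
      rw [show (hd :: mid ++ [a ++ ""] : List String) = hd :: (mid ++ [a ++ ""]) from by simp,
          alt_eq_goJ]
      simp [String.append_empty]
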